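-- pv_equiv track=rewrite | github.com/yoonsung-kim/DaCapo.artifacts | src/emulator/ekya_profiler.py | split_indices
-- ===== SOURCE A (Python) =====
-- import math
-- from typing import List, Tuple, Dict, Any
--
-- def split_indices(indices: List[int], num_to_split: int) -> List[List[int]]:
--     num_indices = len(indices)
--     num_remained = num_indices - num_to_split
--
--     assert num_indices > num_to_split
--     assert num_to_split >= num_remained
--
--     scale = int(math.floor(num_to_split / num_remained))
--
--     idx = 0
--     cnt_remained = 0
--
--     splitted_indices = []
--     remained_indices = []
--
--     while cnt_remained != num_remained:
--         remained_indices.append(indices[idx])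
--         idx += 1
--         cnt_remained += 1
--
--         splitted_indices.extend(indices[idx:idx+scale])
--         idx += scale
--
--     splitted_indices.extend(indices[idx:])
--
--     return splitted_indices, remained_indices
-- ===== SOURCE B (Python) =====
-- def split_indices(indices, num_to_split):
--     num_indices = len(indices)
--     num_remained = num_indices - num_to_split
--     assert num_indices > num_to_split
--     assert num_to_split >= num_remained
--     block = num_to_split // num_remained + 1
--     limit = num_remained * block
--     remained_indices = [x for i, x in enumerate(indices) if i < limit and i % block == 0]
--     splitted_indices = [x for i, x in enumerate(indices) if i >= limit or i % block != 0]
--     return splitted_indices, remained_indices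
-- ===== Notes on version B (the rewrite author's own statement) =====
-- stated objective: alternative
-- what changed: A's stateful while-loop that advances an index cursor block by block (append one remained element, extend a slice of scale splitted ones, then a trailing extend) is replaced by two flat comprehensions over enumerate(indices) that classify each position arithmetically: position i is remained iff i < num_remained*(scale+1) and i % (scale+1) == 0.
import Mathlib
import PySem

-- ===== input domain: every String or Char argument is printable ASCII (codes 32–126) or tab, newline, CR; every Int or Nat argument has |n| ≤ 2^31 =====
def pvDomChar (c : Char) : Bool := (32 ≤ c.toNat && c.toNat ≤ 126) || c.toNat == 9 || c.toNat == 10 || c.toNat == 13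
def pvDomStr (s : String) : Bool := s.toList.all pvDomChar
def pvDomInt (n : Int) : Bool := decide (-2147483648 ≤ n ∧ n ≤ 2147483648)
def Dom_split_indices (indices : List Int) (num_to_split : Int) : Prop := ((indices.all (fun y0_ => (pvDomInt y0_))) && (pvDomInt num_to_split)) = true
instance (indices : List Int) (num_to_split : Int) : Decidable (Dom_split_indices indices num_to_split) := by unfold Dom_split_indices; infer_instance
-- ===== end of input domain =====

-- B replaces A's block-stepping while-loop (index cursor + slice extends) by two flat
-- comprehensions over enumerate(indices) classifying each position arithmetically; same cost.


-- ===== PORT A =====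
-- the while-loop; fuel = num_remained.toNat makes the recursion structural, the loop
-- condition cnt ≠ num_remained is kept and under Pre_ the fuel is never exhausted
def splitLoopA (xs : List Int) (scale numRemained : Int) (fuel : Nat) (idx cnt : Int)
    (sp re : List Int) : Int × List Int × List Int :=
  if cnt = numRemained then (idx, sp, re)
  else match fuel with
    | 0 => (idx, sp, re)
    | f + 1 =>
      splitLoopA xs scale numRemained f (idx + 1 + scale) (cnt + 1)
        (sp ++ PySem.List.slice xs (some (idx + 1)) (some (idx + 1 + scale)))
        (re ++ [PySem.List.pyGetD xs idx 0])   -- indices[idx]: in range under Pre_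

def split_indices (indices : List Int) (num_to_split : Int) : List Int × List Int :=
  let num_indices : Int := indices.length
  let num_remained := num_indices - num_to_split
  -- the two asserts: inputs failing them raise AssertionError and are outside Pre_
  -- int(math.floor(num_to_split / num_remained)) = floor division, exact for |n| ≤ 2^31
  let scale := PySem.Int.floordiv num_to_split num_remained
  let res := splitLoopA indices scale num_remained num_remained.toNat 0 0 [] []
  (res.2.1 ++ PySem.List.slice indices (some res.1) none, res.2.2)

-- ===== PORT B =====
def split_indices_alt (indices : List Int) (num_to_split : Int) : List Int × List Int :=
  let num_remained := (indices.length : Int) - num_to_split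
  let block := PySem.Int.floordiv num_to_split num_remained + 1
  let limit := num_remained * block
  let en := PySem.List.enumerate indices 0
  ((en.filter (fun p => decide (limit ≤ p.1) || !decide (PySem.Int.mod p.1 block = 0))).map Prod.snd,
   (en.filter (fun p => decide (p.1 < limit) && decide (PySem.Int.mod p.1 block = 0))).map Prod.snd)

-- ===== PRECONDITION & SPEC =====
-- exactly the two asserts of A; inputs failing either raise AssertionError in A
def Pre_split_indices (indices : List Int) (num_to_split : Int) : Prop :=
  (indices.length : Int) > num_to_split ∧
  num_to_split ≥ (indices.length : Int) - num_to_split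

instance (indices : List Int) (num_to_split : Int) : Decidable (Pre_split_indices indices num_to_split) := by
  unfold Pre_split_indices; infer_instance

def pvWitness_split_indices : List Int × Int := ([10, 20, 30, 40, 50], 3)

def Spec_split_indices (indices : List Int) (num_to_split : Int) (out : List Int × List Int) : Prop := out = split_indices_alt indices num_to_split
instance (indices : List Int) (num_to_split : Int) (out : List Int × List Int) : Decidable (Spec_split_indices indices num_to_split out) := by unfold Spec_split_indices; infer_instance

-- ===== CLAIM (what is proved, stated in full; the proofs are below) =====
def Claim_equal_split_indices : Prop := ∀ (indices : List Int) (num_to_split : Int), Dom_split_indices indices num_to_split → Pre_split_indices indices num_to_split → Spec_split_indices indices num_to_split (split_indices indices num_to_split)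

-- ===== LEMMAS AND PROOFS =====

lemma enum_append (ys zs : List Int) (s : Int) :
    PySem.List.enumerate (ys ++ zs) s
      = PySem.List.enumerate ys s ++ PySem.List.enumerate zs (s + ys.length) := by
  induction ys generalizing s with
  | nil => simp [PySem.List.enumerate_nil]
  | cons y t ih =>
    simp [PySem.List.enumerate_cons, ih, add_assoc]
    ring_nf

lemma filt_true (q : Int → Bool) (ys : List Int) (s : Int)
    (h : ∀ i : Int, s ≤ i → i < s + ys.length → q i = true) :
    ((PySem.List.enumerate ys s).filter (fun p => q p.1)).map Prod.snd = ys := by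
  induction ys generalizing s with
  | nil => simp [PySem.List.enumerate_nil]
  | cons y t ih =>
    have hq : q s = true := h s le_rfl (by simp)
    simp only [PySem.List.enumerate_cons, List.filter_cons, hq]
    simp only [List.map_cons, if_pos]
    rw [ih (s + 1) (fun i h1 h2 => h i (by omega) (by simp at h2 ⊢; omega))]

lemma filt_false (q : Int → Bool) (ys : List Int) (s : Int)
    (h : ∀ i : Int, s ≤ i → i < s + ys.length → q i = false) :
    ((PySem.List.enumerate ys s).filter (fun p => q p.1)).map Prod.snd = [] := by
  induction ys generalizing s with
  | nil => simp [PySem.List.enumerate_nil]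
  | cons y t ih =>
    have hq : q s = false := h s le_rfl (by simp)
    simp only [PySem.List.enumerate_cons, List.filter_cons, hq]
    exact ih (s + 1) (fun i h1 h2 => h i (by omega) (by simp at h2 ⊢; omega))

-- slice decomposition: head element, middle chunk, rest
lemma slice_decomp (xs : List Int) (a c d : Int) (h0 : 0 ≤ a) (hac : a < c) (hcd : c ≤ d)
    (hlen : a < xs.length) :
    PySem.List.slice xs (some a) (some d)
      = PySem.List.pyGetD xs a 0 ::
        (PySem.List.slice xs (some (a + 1)) (some c) ++ PySem.List.slice xs (some c) (some d)) := by
  rw [PySem.List.slice_toNat _ h0 (by omega), PySem.List.slice_toNat _ (by omega) (by omega),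
      PySem.List.slice_toNat _ (by omega) (by omega),
      PySem.List.pyGetD_eq_getElem _ _ h0 hlen]
  have ha' : a.toNat < xs.length := by omega
  rw [List.drop_eq_getElem_cons ha']
  have h1 : d.toNat - a.toNat = (d.toNat - a.toNat - 1) + 1 := by omega
  rw [h1, List.take_succ_cons]
  have e1 : (a + 1).toNat = a.toNat + 1 := by omega
  have e2 : d.toNat - a.toNat - 1 = (c.toNat - (a.toNat + 1)) + (d.toNat - c.toNat) := by omega
  have e3 : a.toNat + 1 + (c.toNat - (a.toNat + 1)) = c.toNat := by omega
  rw [e1, e2, List.take_add, List.drop_drop, e3]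

lemma loop_inv (xs : List Int) (scale r : Int) (hs : 1 ≤ scale) (hr : 0 < r)
    (hn : r * (scale + 1) ≤ xs.length) :
    ∀ (f : Nat) (cnt : Int) (sp re : List Int), 0 ≤ cnt → cnt + (f : Int) = r →
    splitLoopA xs scale r f (cnt * (scale + 1)) cnt sp re =
      (r * (scale + 1),
       sp ++ ((PySem.List.enumerate
                (PySem.List.slice xs (some (cnt * (scale + 1))) (some (r * (scale + 1))))
                (cnt * (scale + 1))).filter
              (fun p => decide (r * (scale + 1) ≤ p.1) || !decide (PySem.Int.mod p.1 (scale + 1) = 0))).map Prod.snd,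
       re ++ ((PySem.List.enumerate
                (PySem.List.slice xs (some (cnt * (scale + 1))) (some (r * (scale + 1))))
                (cnt * (scale + 1))).filter
              (fun p => decide (p.1 < r * (scale + 1)) && decide (PySem.Int.mod p.1 (scale + 1) = 0))).map Prod.snd) := by
  intro f
  induction f with
  | zero =>
    intro cnt sp re h0 hsum
    have hcr : cnt = r := by push_cast at hsum; omega
    subst hcr
    rw [splitLoopA, if_pos rfl]
    rw [PySem.List.slice_toNat _ (by positivity) (by positivity)]
    simp [PySem.List.enumerate_nil]
  | succ f ih =>
    intro cnt sp re h0 hsum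
    have hb : (0 : Int) < scale + 1 := by omega
    have hlt : cnt < r := by push_cast at hsum; omega
    have hne : cnt ≠ r := by omega
    have hcle : (cnt + 1) * (scale + 1) ≤ r * (scale + 1) := by nlinarith
    have haclen : cnt * (scale + 1) < (xs.length : Int) := by nlinarith
    have hpos : (0 : Int) ≤ cnt * (scale + 1) := by positivity
    have hac : cnt * (scale + 1) < (cnt + 1) * (scale + 1) := by nlinarith
    rw [splitLoopA, if_neg hne]
    have harg : cnt * (scale + 1) + 1 + scale = (cnt + 1) * (scale + 1) := by ring
    rw [harg]
    rw [ih (cnt + 1) _ _ (by omega) (by push_cast at hsum ⊢; omega)]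
    -- decompose the middle slice [cnt*b, r*b) into head, chunk, rest
    rw [slice_decomp xs _ ((cnt + 1) * (scale + 1)) _ hpos hac hcle (by exact_mod_cast haclen)]
    have hchunklen :
        ((PySem.List.slice xs (some (cnt * (scale + 1) + 1)) (some ((cnt + 1) * (scale + 1)))).length : Int)
          = scale := by
      rw [PySem.List.slice_toNat _ (by omega) (by omega)]
      have h1 : ((cnt + 1) * (scale + 1)).toNat ≤ xs.length := by omega
      simp [List.length_take, List.length_drop]
      omega
    -- head position facts
    have hmod0 : PySem.Int.mod (cnt * (scale + 1)) (scale + 1) = 0 :=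
      (PySem.Int.mod_eq_zero_iff_dvd _ _).2 ⟨cnt, mul_comm _ _⟩
    have hnotge : ¬ (r * (scale + 1) ≤ cnt * (scale + 1)) := by nlinarith
    -- chunk position facts: strictly between consecutive multiples of scale+1
    have hchunk : ∀ i : Int, cnt * (scale + 1) + 1 ≤ i → i < (cnt + 1) * (scale + 1) →
        PySem.Int.mod i (scale + 1) ≠ 0 := by
      intro i hi1 hi2 hmod
      obtain ⟨q, hq⟩ := (PySem.Int.mod_eq_zero_iff_dvd _ _).1 hmod
      have hq1 : cnt < q := by nlinarith
      have hq2 : q < cnt + 1 := by nlinarith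
      omega
    rw [PySem.List.enumerate_cons, enum_append, hchunklen]
    have hstart : cnt * (scale + 1) + 1 + scale = (cnt + 1) * (scale + 1) := by ring
    rw [hstart]
    simp only [List.filter_cons, List.filter_append]
    have hhead1 : (decide (r * (scale + 1) ≤ cnt * (scale + 1)) || !decide (PySem.Int.mod (cnt * (scale + 1)) (scale + 1) = 0)) = false := by
      simp [hmod0, hnotge]
    have hhead2 : (decide (cnt * (scale + 1) < r * (scale + 1)) && decide (PySem.Int.mod (cnt * (scale + 1)) (scale + 1) = 0)) = true := by
      simp [hmod0]; nlinarith
    simp only [hhead1, hhead2, Bool.false_eq_true, if_false, if_true, List.map_append, List.map_cons]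
    rw [filt_true (fun i => decide (r * (scale + 1) ≤ i) || !decide (PySem.Int.mod i (scale + 1) = 0))
          (PySem.List.slice xs (some (cnt * (scale + 1) + 1)) (some ((cnt + 1) * (scale + 1))))
          (cnt * (scale + 1) + 1) (fun i h1 h2 => by
            have hi2 : i < (cnt + 1) * (scale + 1) := by
              rw [hchunklen] at h2; omega
            simp [hchunk i h1 hi2]),
        filt_false (fun i => decide (i < r * (scale + 1)) && decide (PySem.Int.mod i (scale + 1) = 0))
          (PySem.List.slice xs (some (cnt * (scale + 1) + 1)) (some ((cnt + 1) * (scale + 1))))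
          (cnt * (scale + 1) + 1) (fun i h1 h2 => by
            have hi2 : i < (cnt + 1) * (scale + 1) := by
              rw [hchunklen] at h2; omega
            simp [hchunk i h1 hi2])]
    simp [List.append_assoc]

-- ===== VERDICT (by name: the statement is the Claim_ definition above) =====
theorem split_indices_spec : Claim_equal_split_indices := by
  intro xs k _ hpre
  obtain ⟨hp1, hp2⟩ := hpre
  unfold Spec_split_indices
  simp only [split_indices, split_indices_alt]
  set n : Int := (xs.length : Int) with hn
  set r : Int := n - k with hrdef
  set scale : Int := PySem.Int.floordiv k r with hsdef
  have hr : 0 < r := by omega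
  have hkr : r ≤ k := by omega
  have hs : 1 ≤ scale := by
    rw [hsdef, PySem.Int.le_floordiv_iff_mul_le hr]
    omega
  have hmul : scale * r + PySem.Int.mod k r = k := PySem.Int.floordiv_mul_add_mod k r
  have hmn : 0 ≤ PySem.Int.mod k r := PySem.Int.mod_nonneg k hr
  have hlim : r * (scale + 1) ≤ n := by nlinarith
  have hlim0 : 0 ≤ r * (scale + 1) := by positivity
  have hz : splitLoopA xs scale r r.toNat 0 0 [] []
      = splitLoopA xs scale r r.toNat (0 * (scale + 1)) 0 [] [] := by norm_num
  rw [hz, loop_inv xs scale r hs hr hlim r.toNat 0 [] [] le_rfl (by omega)]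
  simp only [zero_mul, List.nil_append]
  have htake : PySem.List.slice xs (some 0) (some (r * (scale + 1)))
      = xs.take (r * (scale + 1)).toNat := by
    rw [PySem.List.slice_zero_start, PySem.List.slice_to _ hlim0]
  have hdrop : PySem.List.slice xs (some (r * (scale + 1))) none
      = xs.drop (r * (scale + 1)).toNat := PySem.List.slice_from _ hlim0
  have hsplit : PySem.List.enumerate xs 0
      = PySem.List.enumerate (xs.take (r * (scale + 1)).toNat) 0
        ++ PySem.List.enumerate (xs.drop (r * (scale + 1)).toNat) (r * (scale + 1)) := by
    conv_lhs => rw [← List.take_append_drop (r * (scale + 1)).toNat xs]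
    rw [enum_append]
    congr 1
    simp only [List.length_take]
    congr 1
    omega
  rw [htake, hdrop, hsplit]
  simp only [List.filter_append, List.map_append]
  rw [filt_true (fun i => decide (r * (scale + 1) ≤ i) || !decide (PySem.Int.mod i (scale + 1) = 0))
        (xs.drop (r * (scale + 1)).toNat) (r * (scale + 1))
        (fun i h1 _ => by simp [h1]),
      filt_false (fun i => decide (i < r * (scale + 1)) && decide (PySem.Int.mod i (scale + 1) = 0))
        (xs.drop (r * (scale + 1)).toNat) (r * (scale + 1))
        (fun i h1 _ => by simp; omega)]
  simp
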